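-- pv_equiv track=rewrite | github.com/justnotanu/leetcode | 1574-shortest-subarray-to-be-removed-to-make-array-sorted/1574-shortest-subarray-to-be-removed-to-make-array-sorted.py | findLengthOfShortestSubarray
-- ===== SOURCE A (Python) =====
-- from typing import List
--
-- def findLengthOfShortestSubarray(arr: List[int]) -> int:
--     n = len(arr)
--
--     # Step 1: Find sorted prefix
--     left = 0
--     while left < n - 1 and arr[left] <= arr[left + 1]:
--         left += 1
--
--     # If already fully sorted
--     if left == n - 1:
--         return 0
--
--     # Step 2: Find sorted suffix
--     right = n - 1
--     while right > 0 and arr[right] >= arr[right - 1]: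
--         right -= 1
--
--     # Step 3: Calculate minimum length to remove
--     min_length = min(n - left - 1, right)  # Remove either from start or end
--
--     # Step 4: Check for overlaps between prefix and suffix
--     j = right
--     for i in range(left + 1):
--         while j < n and arr[j] < arr[i]:
--             j += 1
--         if j < n:
--             min_length = min(min_length, j - i - 1)
--
--     return min_length
-- ===== SOURCE B (Python) =====
-- from typing import List
--
-- def _lower_bound(arr, x, lo, hi):
--     # first index j in [lo, hi) with arr[j] >= x, else hi
--     while lo < hi:
--         mid = (lo + hi) // 2
--         if arr[mid] < x:
--             lo = mid + 1
--         else: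
--             hi = mid
--     return lo
--
-- def findLengthOfShortestSubarray(arr: List[int]) -> int:
--     n = len(arr)
--     left = next((i for i in range(n - 1) if arr[i] > arr[i + 1]), n - 1)
--     if left == n - 1:
--         return 0
--     right = next((j for j in range(n - 1, 0, -1) if arr[j] < arr[j - 1]), 0)
--     best = min(n - left - 1, right)
--     for i in range(left + 1):
--         j = _lower_bound(arr, arr[i], right, n)
--         if j < n:
--             best = min(best, j - i - 1)
--     return best
-- ===== Notes on version B (the rewrite author's own statement) =====
-- stated objective: alternative
-- what changed: Prefix/suffix scans become generator+next searches for the first descent, and Step 4's monotonic two-pointer merge is replaced by an independent hand-rolled binary search (lower bound) into the sorted suffix for each prefix index.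
import Mathlib
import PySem

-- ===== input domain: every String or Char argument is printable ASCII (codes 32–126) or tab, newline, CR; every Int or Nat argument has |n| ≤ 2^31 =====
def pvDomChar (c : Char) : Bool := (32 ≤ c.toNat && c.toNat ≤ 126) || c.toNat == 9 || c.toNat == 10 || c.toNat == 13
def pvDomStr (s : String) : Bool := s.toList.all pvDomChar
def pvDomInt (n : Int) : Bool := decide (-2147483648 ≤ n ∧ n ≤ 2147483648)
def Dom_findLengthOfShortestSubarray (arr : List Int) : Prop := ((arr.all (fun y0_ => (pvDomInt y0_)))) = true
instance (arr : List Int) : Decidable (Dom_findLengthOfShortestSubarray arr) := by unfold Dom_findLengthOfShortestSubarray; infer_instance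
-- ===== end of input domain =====

-- B replaces A's prefix/suffix while-scans by first-descent searches and A's Step-4
-- two-pointer merge by an independent hand-rolled binary search per prefix index (alternative, not faster).

-- ===== PORT A =====
-- Step 1 while-loop: indices are Nat and in range on Pre_ (arr ≠ []), so getD is exact there.
def pvALeft (arr : List Int) (n left : Nat) : Nat :=
  if h : left < n - 1 ∧ arr.getD left 0 ≤ arr.getD (left + 1) 0 then
    pvALeft arr n (left + 1)
  else left
termination_by n - 1 - left
decreasing_by omega

-- Step 2 while-loop
def pvARight (arr : List Int) (right : Nat) : Nat :=
  if h : 0 < right ∧ arr.getD (right - 1) 0 ≤ arr.getD right 0 then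
    pvARight arr (right - 1)
  else right
termination_by right

-- Step 4 inner while-loop
def pvAAdv (arr : List Int) (n j : Nat) (x : Int) : Nat :=
  if h : j < n ∧ arr.getD j 0 < x then pvAAdv arr n (j + 1) x else j
termination_by n - j
decreasing_by omega

-- Python's `left == n - 1` guard is False on [] (left=0, n-1=-1) where A then raises;
-- the Nat guard below agrees with Python on every non-empty list (= Pre_).
def findLengthOfShortestSubarray (arr : List Int) : Int :=
  let n := arr.length
  let left := pvALeft arr n 0
  if left = n - 1 then 0
  else
    let right := pvARight arr (n - 1)
    let minLen : Int := min ((n : Int) - left - 1) (right : Int)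
    let s := (List.range (left + 1)).foldl
      (fun (s : Nat × Int) i =>
        let j := pvAAdv arr n s.1 (arr.getD i 0)
        (j, if j < n then min s.2 ((j : Int) - (i : Int) - 1) else s.2))
      (right, minLen)
    s.2

-- ===== PORT B =====
-- hand-rolled _lower_bound from Source B: first j in [lo, hi) with arr[j] >= x, else hi
def pvLB (arr : List Int) (x : Int) (lo hi : Nat) : Nat :=
  if h : lo < hi then
    let mid := (lo + hi) / 2
    if arr.getD mid 0 < x then pvLB arr x (mid + 1) hi else pvLB arr x lo mid
  else lo
termination_by hi - lo
decreasing_by all_goals omega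

-- next(..., default) over range generators becomes find? with getD;
-- range(n-1, 0, -1) is enumerated as the list (List.range' 1 (n-1)).reverse = [n-1, …, 1].
def findLengthOfShortestSubarray_alt (arr : List Int) : Int :=
  let n := arr.length
  let left : Int :=
    (((List.range (n - 1)).find? (fun i => decide (arr.getD (i + 1) 0 < arr.getD i 0))).map
      (fun i => (i : Int))).getD ((n : Int) - 1)
  if left = (n : Int) - 1 then (0 : Int)
  else
    let right : Nat :=
      (((List.range' 1 (n - 1)).reverse).find?
        (fun j => decide (arr.getD j 0 < arr.getD (j - 1) 0))).getD 0
    let best : Int := min ((n : Int) - left - 1) (right : Int)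
    (List.range (left.toNat + 1)).foldl
      (fun best i =>
        let j := pvLB arr (arr.getD i 0) right n
        if j < n then min best ((j : Int) - (i : Int) - 1) else best)
      best

-- ===== PRECONDITION & SPEC =====
-- Pre_ excludes exactly the empty list, on which A raises IndexError (arr[-1] in Step 4); B returns 0 there.
def Pre_findLengthOfShortestSubarray (arr : List Int) : Prop := arr ≠ []
instance (arr : List Int) : Decidable (Pre_findLengthOfShortestSubarray arr) := by
  unfold Pre_findLengthOfShortestSubarray; infer_instance

def pvWitness_findLengthOfShortestSubarray : List Int := [3, 1, 2]

def Spec_findLengthOfShortestSubarray (arr : List Int) (out : Int) : Prop :=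
  out = findLengthOfShortestSubarray_alt arr
instance (arr : List Int) (out : Int) : Decidable (Spec_findLengthOfShortestSubarray arr out) := by
  unfold Spec_findLengthOfShortestSubarray; infer_instance

-- ===== CLAIM (what is proved, stated in full; the proofs are below) =====
def Claim_equal_findLengthOfShortestSubarray : Prop :=
  ∀ (arr : List Int), Dom_findLengthOfShortestSubarray arr →
    Pre_findLengthOfShortestSubarray arr →
    Spec_findLengthOfShortestSubarray arr (findLengthOfShortestSubarray arr)

-- ===== LEMMAS AND PROOFS =====

theorem pvALeft_char (arr : List Int) (n : Nat) : ∀ (l : Nat), l ≤ n - 1 →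
    pvALeft arr n l =
      (((List.range' l (n - 1 - l)).find?
          (fun i => decide (arr.getD (i + 1) 0 < arr.getD i 0))).getD (n - 1))
  | l, hl => by
    rw [pvALeft]
    split
    · rename_i hc
      rw [pvALeft_char arr n (l + 1) (by omega)]
      rw [show n - 1 - l = (n - 1 - (l + 1)) + 1 by omega, List.range'_succ]
      rw [List.find?_cons_of_neg]
      simp only [decide_eq_true_eq, not_lt]
      exact hc.2
    · rename_i hc
      rcases Nat.eq_or_lt_of_le hl with rfl | h
      · simp
      · rw [show n - 1 - l = (n - 1 - (l + 1)) + 1 by omega, List.range'_succ]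
        rw [List.find?_cons_of_pos]
        · simp
        · simp only [decide_eq_true_eq]
          rcases not_and_or.mp hc with h' | h'
          · omega
          · exact lt_of_not_ge h'
  termination_by l => n - 1 - l

theorem pvALeft_sorted (arr : List Int) (n : Nat) : ∀ (l k : Nat), l ≤ k →
    k < pvALeft arr n l → arr.getD k 0 ≤ arr.getD (k + 1) 0
  | l, k, h1, h2 => by
    rw [pvALeft] at h2
    split at h2
    · rename_i hc
      rcases Nat.eq_or_lt_of_le h1 with rfl | h
      · exact hc.2
      · exact pvALeft_sorted arr n (l + 1) k h h2
    · omega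
  termination_by l _ => n - 1 - l
  decreasing_by omega

theorem pvALeft_le (arr : List Int) (n l : Nat) (hl : l ≤ n - 1) :
    pvALeft arr n l ≤ n - 1 := by
  rw [pvALeft_char arr n l hl]
  rcases hfind : (List.range' l (n - 1 - l)).find?
      (fun i => decide (arr.getD (i + 1) 0 < arr.getD i 0)) with _ | i
  · simp
  · have := List.mem_of_find?_eq_some hfind
    rw [List.mem_range'_1] at this
    simp only [Option.getD_some]
    omega

theorem pvARight_char (arr : List Int) (r : Nat) :
    pvARight arr r =
      (((List.range' 1 r).reverse.find?
          (fun j => decide (arr.getD j 0 < arr.getD (j - 1) 0))).getD 0) := by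
  induction r using Nat.strong_induction_on with
  | _ r ih =>
    rw [pvARight]
    split
    · rename_i hc
      rw [ih (r - 1) (by omega)]
      conv_rhs => rw [show r = (r - 1) + 1 by omega, List.range'_concat, List.reverse_append]
      simp only [List.reverse_singleton, List.singleton_append]
      rw [show 1 + 1 * (r - 1) = r by omega, List.find?_cons_of_neg]
      simp only [decide_eq_true_eq, not_lt]
      exact hc.2
    · rename_i hc
      rcases Nat.eq_zero_or_pos r with rfl | h
      · simp
      · conv_rhs => rw [show r = (r - 1) + 1 by omega, List.range'_concat, List.reverse_append]
        simp only [List.reverse_singleton, List.singleton_append]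
        rw [show 1 + 1 * (r - 1) = r by omega, List.find?_cons_of_pos]
        · simp only [Option.getD_some]
        · simp only [decide_eq_true_eq]
          rcases not_and_or.mp hc with h' | h'
          · omega
          · exact lt_of_not_ge h'

theorem pvARight_le (arr : List Int) (r : Nat) : pvARight arr r ≤ r := by
  induction r using Nat.strong_induction_on with
  | _ r ih =>
    rw [pvARight]
    split
    · rename_i hc
      have := ih (r - 1) (by omega)
      omega
    · exact le_refl r

theorem pvARight_sorted (arr : List Int) (r : Nat) : ∀ (k : Nat), pvARight arr r < k →
    k ≤ r → arr.getD (k - 1) 0 ≤ arr.getD k 0 := by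
  induction r using Nat.strong_induction_on with
  | _ r ih =>
    intro k h1 h2
    rw [pvARight] at h1
    split at h1
    · rename_i hc
      rcases Nat.eq_or_lt_of_le h2 with rfl | h
      · exact hc.2
      · exact ih (r - 1) (by omega) k h1 (by omega)
    · omega

theorem pvAAdv_char (arr : List Int) (x : Int) (n : Nat) : ∀ (j : Nat), j ≤ n →
    j ≤ pvAAdv arr n j x ∧ pvAAdv arr n j x ≤ n ∧
    (∀ k, j ≤ k → k < pvAAdv arr n j x → arr.getD k 0 < x) ∧
    (pvAAdv arr n j x < n → x ≤ arr.getD (pvAAdv arr n j x) 0)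
  | j, hj => by
    rw [pvAAdv]
    split
    · rename_i hc
      obtain ⟨ih1, ih2, ih3, ih4⟩ := pvAAdv_char arr x n (j + 1) (by omega)
      refine ⟨by omega, ih2, ?_, ih4⟩
      intro k hk1 hk2
      rcases Nat.eq_or_lt_of_le hk1 with rfl | h
      · exact hc.2
      · exact ih3 k h hk2
    · rename_i hc
      refine ⟨le_refl j, hj, by omega, ?_⟩
      intro hjn
      rcases not_and_or.mp hc with h' | h'
      · omega
      · exact le_of_not_gt h'
  termination_by j => n - j
  decreasing_by omega

theorem pvAdv_unique (arr : List Int) (n R r1 r2 : Nat) (x : Int)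
    (h1a : R ≤ r1) (h1b : r1 ≤ n) (h1c : ∀ k, R ≤ k → k < r1 → arr.getD k 0 < x)
    (h1d : r1 < n → x ≤ arr.getD r1 0)
    (h2a : R ≤ r2) (h2b : r2 ≤ n) (h2c : ∀ k, R ≤ k → k < r2 → arr.getD k 0 < x)
    (h2d : r2 < n → x ≤ arr.getD r2 0) : r1 = r2 := by
  rcases Nat.lt_trichotomy r1 r2 with h | h | h
  · exact absurd (h2c r1 h1a h) (not_lt.mpr (h1d (lt_of_lt_of_le h h2b)))
  · exact h
  · exact absurd (h1c r2 h2a h) (not_lt.mpr (h2d (lt_of_lt_of_le h h1b)))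

theorem pvAAdv_restart (arr : List Int) (n : Nat) (x : Int) : ∀ (R j : Nat),
    R ≤ j → j ≤ n → (∀ k, R ≤ k → k < j → arr.getD k 0 < x) →
    pvAAdv arr n j x = pvAAdv arr n R x
  | R, j, hR, hj, h => by
    rcases Nat.eq_or_lt_of_le hR with rfl | hlt
    · rfl
    · conv_rhs => rw [pvAAdv]
      rw [dif_pos ⟨by omega, h R (le_refl R) hlt⟩]
      exact pvAAdv_restart arr n x (R + 1) j hlt hj (fun k hk1 hk2 => h k (by omega) hk2)
  termination_by R j => j - R
  decreasing_by omega

theorem pvLB_char (arr : List Int) (n R : Nat) (x : Int)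
    (hsort : ∀ a b, R ≤ a → a ≤ b → b < n → arr.getD a 0 ≤ arr.getD b 0) :
    ∀ (lo hi : Nat), R ≤ lo → lo ≤ hi → hi ≤ n →
    (∀ k, R ≤ k → k < lo → arr.getD k 0 < x) →
    (∀ k, hi ≤ k → k < n → x ≤ arr.getD k 0) →
    R ≤ pvLB arr x lo hi ∧ pvLB arr x lo hi ≤ n ∧
    (∀ k, R ≤ k → k < pvLB arr x lo hi → arr.getD k 0 < x) ∧
    (pvLB arr x lo hi < n → x ≤ arr.getD (pvLB arr x lo hi) 0)
  | lo, hi, h1, h2, h3, hlo, hhi => by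
    rw [pvLB]
    split
    · rename_i hlt
      dsimp only
      split
      · rename_i hmid
        exact pvLB_char arr n R x hsort ((lo + hi) / 2 + 1) hi (by omega) (by omega) h3
          (fun k hk1 hk2 => by
            rcases Nat.lt_or_ge k lo with h' | h'
            · exact hlo k hk1 h'
            · exact lt_of_le_of_lt (hsort k ((lo + hi) / 2) hk1 (by omega) (by omega)) hmid)
          hhi
      · rename_i hmid
        exact pvLB_char arr n R x hsort lo ((lo + hi) / 2) h1 (by omega) (by omega) hlo
          (fun k hk1 hk2 => le_trans (le_of_not_gt hmid)
            (hsort ((lo + hi) / 2) k (by omega) hk1 hk2))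
    · rename_i hlt
      exact ⟨h1, by omega, hlo, fun h => hhi lo (by omega) h⟩
  termination_by lo hi => hi - lo
  decreasing_by all_goals omega

theorem pvLB_eq_adv (arr : List Int) (n R : Nat) (x : Int) (hRn : R ≤ n)
    (hsort : ∀ a b, R ≤ a → a ≤ b → b < n → arr.getD a 0 ≤ arr.getD b 0) :
    pvLB arr x R n = pvAAdv arr n R x := by
  have h1 := pvLB_char arr n R x hsort R n (le_refl R) hRn (le_refl n)
    (by omega) (by omega)
  have h2 := pvAAdv_char arr x n R hRn
  exact pvAdv_unique arr n R _ _ x h1.1 h1.2.1 h1.2.2.1 h1.2.2.2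
    h2.1 h2.2.1 h2.2.2.1 h2.2.2.2

-- the Step-4 fold: A's (pointer, best) fold equals B's best-only fold
theorem fold_eq (arr : List Int) (n L R : Nat)
    (hmono : ∀ a b, a ≤ b → b ≤ L → arr.getD a 0 ≤ arr.getD b 0)
    (hsort : ∀ a b, R ≤ a → a ≤ b → b < n → arr.getD a 0 ≤ arr.getD b 0)
    (hRn : R ≤ n) :
    ∀ (c i j : Nat) (ml : Int), i + c = L + 1 → R ≤ j → j ≤ n →
      (∀ k, R ≤ k → k < j → arr.getD k 0 < arr.getD i 0) →
      ((List.range' i c).foldl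
        (fun (s : Nat × Int) i =>
          let j := pvAAdv arr n s.1 (arr.getD i 0)
          (j, if j < n then min s.2 ((j : Int) - (i : Int) - 1) else s.2))
        (j, ml)).2 =
      (List.range' i c).foldl
        (fun best i =>
          let j := pvLB arr (arr.getD i 0) R n
          if j < n then min best ((j : Int) - (i : Int) - 1) else best)
        ml := by
  intro c
  induction c with
  | zero => intro i j ml _ _ _ _; rfl
  | succ c ih =>
    intro i j ml hiL hRj hjn hinv
    rw [List.range'_succ]
    simp only [List.foldl_cons]
    have hadv : pvAAdv arr n j (arr.getD i 0) = pvAAdv arr n R (arr.getD i 0) :=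
      pvAAdv_restart arr n (arr.getD i 0) R j hRj hjn hinv
    have hlb : pvLB arr (arr.getD i 0) R n = pvAAdv arr n R (arr.getD i 0) :=
      pvLB_eq_adv arr n R (arr.getD i 0) hRn hsort
    obtain ⟨hc1, hc2, hc3, _⟩ := pvAAdv_char arr (arr.getD i 0) n R hRn
    rcases Nat.eq_zero_or_pos c with rfl | hc
    · simp only [List.range'_zero, List.foldl_nil, hadv, hlb]
    · exact (by
        rw [hadv, hlb]
        exact ih (i + 1) (pvAAdv arr n R (arr.getD i 0)) _ (by omega) hc1 hc2
          (fun k hk1 hk2 =>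
            lt_of_lt_of_le (hc3 k hk1 hk2) (hmono i (i + 1) (by omega) (by omega))))


-- ===== VERDICT (by name: the statement is the Claim_ definition above) =====
theorem findLengthOfShortestSubarray_spec : Claim_equal_findLengthOfShortestSubarray := by
  intro arr _ hpre
  unfold Spec_findLengthOfShortestSubarray findLengthOfShortestSubarray
    findLengthOfShortestSubarray_alt
  have hn : 0 < arr.length := List.length_pos_of_ne_nil hpre
  set n := arr.length with hn_def
  have hchar := pvALeft_char arr n 0 (by omega)
  simp only [Nat.sub_zero] at hchar
  set L := pvALeft arr n 0 with hLdef
  have hLle : L ≤ n - 1 := pvALeft_le arr n 0 (by omega)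
  have hleftB : (((List.range (n - 1)).find?
      (fun i => decide (arr.getD (i + 1) 0 < arr.getD i 0))).map
        (fun i => (i : Int))).getD ((n : Int) - 1) = (L : Int) := by
    rw [List.range_eq_range', hchar]
    rcases hfind : (List.range' 0 (n - 1)).find?
        (fun i => decide (arr.getD (i + 1) 0 < arr.getD i 0)) with _ | i
    · simp
      omega
    · simp
  simp only [hleftB]
  by_cases hL : L = n - 1
  · rw [if_pos hL, if_pos (by omega : (L : Int) = (n : Int) - 1)]
  · rw [if_neg hL, if_neg (by omega : ¬ (L : Int) = (n : Int) - 1)]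
    rw [← pvARight_char arr (n - 1)]
    set R := pvARight arr (n - 1) with hRdef
    have hRle : R ≤ n - 1 := pvARight_le arr (n - 1)
    simp only [Int.toNat_natCast]
    have hmono : ∀ a b, a ≤ b → b ≤ L → arr.getD a 0 ≤ arr.getD b 0 := by
      intro a b hab hbL
      induction b, hab using Nat.le_induction with
      | base => exact le_refl _
      | succ b hab ih =>
        exact le_trans (ih (by omega))
          (pvALeft_sorted arr n 0 b (Nat.zero_le b) (by omega))
    have hsort : ∀ a b, R ≤ a → a ≤ b → b < n → arr.getD a 0 ≤ arr.getD b 0 := by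
      intro a b h1 h2 h3
      induction b, h2 using Nat.le_induction with
      | base => exact le_refl _
      | succ b hab ih =>
        refine le_trans (ih (by omega)) ?_
        have := pvARight_sorted arr (n - 1) (b + 1) (by omega) (by omega)
        simpa using this
    rw [List.range_eq_range']
    exact fold_eq arr n L R hmono hsort (by omega) (L + 1) 0 R _ (by omega)
      (le_refl R) (by omega) (by omega)
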